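-- pv_equiv track=rewrite | github.com/emooreatx/CIRISAgent | tools/ciris_mypy_toolkit/core.py | _categorize_errors
-- ===== SOURCE A (Python) =====
-- from collections import defaultdict
-- from typing import Any, Dict, List, Optional
--
-- def _categorize_errors(errors: List[Dict[str, Any]]) -> Dict[str, List[Dict[str, Any]]]:
--     """Categorize mypy errors for systematic fixing."""
--     categories = defaultdict(list)
--
--     for error in errors:
--         message = error["message"]
--
--         if "Function is missing" in message:
--             categories["missing_type_annotations"].append(error)
--         elif "has no attribute" in message:
--             categories["attribute_access_errors"].append(error)
--         elif "Incompatible types" in message: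
--             categories["type_mismatches"].append(error)
--         elif "Returning Any" in message:
--             categories["return_type_issues"].append(error)
--         elif "Statement is unreachable" in message:
--             categories["unreachable_code"].append(error)
--         elif "union-attr" in error.get("code", ""):
--             categories["union_attribute_access"].append(error)
--         else:
--             categories["other"].append(error)
--
--     return dict(categories)
-- ===== SOURCE B (Python) =====
-- # Table-driven two-phase rewrite: classify each error via an ordered rule table,
-- # then group by category (first-appearance order), instead of A's inline if/elif
-- # chain appending into a defaultdict.
-- from typing import Any, Dict, List
--
-- _RULES = [
--     ("message", "Function is missing", "missing_type_annotations"),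
--     ("message", "has no attribute", "attribute_access_errors"),
--     ("message", "Incompatible types", "type_mismatches"),
--     ("message", "Returning Any", "return_type_issues"),
--     ("message", "Statement is unreachable", "unreachable_code"),
--     ("code", "union-attr", "union_attribute_access"),
-- ]
--
-- def _classify(error: Dict[str, Any]) -> str:
--     message = error["message"]
--     for field, sub, cat in _RULES:
--         text = message if field == "message" else error.get(field, "")
--         if sub in text:
--             return cat
--     return "other"
--
-- def _categorize_errors(errors: List[Dict[str, Any]]) -> Dict[str, List[Dict[str, Any]]]:
--     labeled = [(_classify(e), e) for e in errors]
--     order: List[str] = []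
--     for cat, _ in labeled:
--         if cat not in order:
--             order.append(cat)
--     return {cat: [e for c, e in labeled if c == cat] for cat in order}
-- ===== Notes on version B (the rewrite author's own statement) =====
-- stated objective: alternative
-- what changed: Replaces A's single fold that appends into a defaultdict through an inline if/elif chain by a two-phase table-driven version: an ordered rule table classifies each error, then the result is grouped by category in first-appearance order via comprehensions.
-- outside the precondition, e.g. on _categorize_errors([{'code': 'x'}]): A raises KeyError, B raises KeyError
import Mathlib
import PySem

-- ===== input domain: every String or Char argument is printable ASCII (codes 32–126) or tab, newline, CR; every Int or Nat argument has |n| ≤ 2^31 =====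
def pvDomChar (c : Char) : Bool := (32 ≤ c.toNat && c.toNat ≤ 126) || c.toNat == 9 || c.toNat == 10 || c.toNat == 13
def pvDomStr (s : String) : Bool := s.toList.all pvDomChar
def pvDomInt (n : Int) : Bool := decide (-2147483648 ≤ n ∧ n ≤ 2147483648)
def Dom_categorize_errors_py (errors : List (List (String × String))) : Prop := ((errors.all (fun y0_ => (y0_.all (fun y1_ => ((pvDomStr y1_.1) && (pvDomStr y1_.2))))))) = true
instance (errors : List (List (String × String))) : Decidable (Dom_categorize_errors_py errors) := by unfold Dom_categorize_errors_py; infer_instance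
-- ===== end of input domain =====

-- B is an alternative decomposition (rule table + classify + group), not faster; equivalence is on the return value.

-- shared: first-match lookup in an association list (a Python dict read)
def pvLookup (error : List (String × String)) (k : String) : Option String :=
  (error.find? (fun p => p.1 == k)).map (fun p => p.2)

-- ===== PORT A =====
-- A's loop body: defaultdict(list) append through the if/elif chain
def pvAStep (cats : PySem.Dict String (List (List (String × String)))) (error : List (String × String)) :
    PySem.Dict String (List (List (String × String))) :=
  let message := (pvLookup error "message").getD ""
  let put := fun c => cats.insert c (cats.getD c [] ++ [error])
  if PySem.Str.isIn "Function is missing" message then put "missing_type_annotations"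
  else if PySem.Str.isIn "has no attribute" message then put "attribute_access_errors"
  else if PySem.Str.isIn "Incompatible types" message then put "type_mismatches"
  else if PySem.Str.isIn "Returning Any" message then put "return_type_issues"
  else if PySem.Str.isIn "Statement is unreachable" message then put "unreachable_code"
  else if PySem.Str.isIn "union-attr" ((pvLookup error "code").getD "") then put "union_attribute_access"
  else put "other"

def categorize_errors_py (errors : List (List (String × String))) : List (String × List (List (String × String))) :=
  (errors.foldl pvAStep PySem.Dict.empty).items

-- ===== PORT B =====
def pvRules : List (String × String × String) :=
  [("message", "Function is missing", "missing_type_annotations"),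
   ("message", "has no attribute", "attribute_access_errors"),
   ("message", "Incompatible types", "type_mismatches"),
   ("message", "Returning Any", "return_type_issues"),
   ("message", "Statement is unreachable", "unreachable_code"),
   ("code", "union-attr", "union_attribute_access")]

def pvClassify (error : List (String × String)) : String :=
  let message := (pvLookup error "message").getD ""
  match pvRules.find? (fun r =>
      PySem.Str.isIn r.2.1 (if r.1 == "message" then message else (pvLookup error r.1).getD "")) with
  | some r => r.2.2
  | none => "other"

def categorize_errors_py_alt (errors : List (List (String × String))) : List (String × List (List (String × String))) :=
  let labeled := errors.map (fun e => (pvClassify e, e))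
  let order := labeled.foldl (fun acc p => PySem.Set.add acc p.1) []
  order.map (fun c => (c, (labeled.filter (fun p => p.1 == c)).map (fun p => p.2)))

-- ===== PRECONDITION & SPEC =====
-- Pre_ excludes errors without a "message" key, on which Python A raises KeyError.
def Pre_categorize_errors_py (errors : List (List (String × String))) : Prop :=
  ∀ e ∈ errors, e.any (fun p => p.1 == "message") = true
instance (errors : List (List (String × String))) : Decidable (Pre_categorize_errors_py errors) := by
  unfold Pre_categorize_errors_py; infer_instance

def pvWitness_categorize_errors_py : (List (List (String × String))) :=
  [[("message", "Returning Any from function")], [("message", "ok"), ("code", "union-attr")]]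

def Spec_categorize_errors_py (errors : List (List (String × String))) (out : List (String × List (List (String × String)))) : Prop := out = categorize_errors_py_alt errors
instance (errors : List (List (String × String))) (out : List (String × List (List (String × String)))) : Decidable (Spec_categorize_errors_py errors out) := by unfold Spec_categorize_errors_py; infer_instance

-- ===== CLAIM (what is proved, stated in full; the proofs are below) =====
def Claim_equal_categorize_errors_py : Prop := ∀ (errors : List (List (String × String))), Dom_categorize_errors_py errors → Pre_categorize_errors_py errors → Spec_categorize_errors_py errors (categorize_errors_py errors)

-- ===== LEMMAS AND PROOFS =====

-- A's if/elif chain performs exactly one defaultdict-append, at B's classify key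
theorem pvAStep_eq (cats : PySem.Dict String (List (List (String × String)))) (e : List (String × String)) :
    pvAStep cats e = cats.insert (pvClassify e) (cats.getD (pvClassify e) [] ++ [e]) := by
  unfold pvAStep pvClassify pvRules
  simp only [List.find?]
  split_ifs <;> simp_all

-- the grouped form of B, parameterised over a prefix of the input
def pvGroup (errors : List (List (String × String))) : List (String × List (List (String × String))) :=
  let labeled := errors.map (fun e => (pvClassify e, e))
  let order := labeled.foldl (fun acc p => PySem.Set.add acc p.1) []
  order.map (fun c => (c, (labeled.filter (fun p => p.1 == c)).map (fun p => p.2)))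

theorem pvOrder_eq (errors : List (List (String × String))) :
    (errors.map (fun e => (pvClassify e, e))).foldl (fun acc p => PySem.Set.add acc p.1) [] =
      PySem.Set.ofList (errors.map pvClassify) := by
  induction errors using List.reverseRecOn with
  | nil => rfl
  | append_singleton xs e ih =>
      simp [List.foldl_append, ih, PySem.Set.ofList_eq_foldl, List.map_append]

-- per-category collected list, and pvGroup rewritten through Set.ofList
def pvValue (c : String) (xs : List (List (String × String))) : List (List (String × String)) :=
  ((xs.map (fun e => (pvClassify e, e))).filter (fun p => p.1 == c)).map (fun p => p.2)

theorem pvGroup_eq (xs : List (List (String × String))) :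
    pvGroup xs = (PySem.Set.ofList (xs.map pvClassify)).map (fun c => (c, pvValue c xs)) := by
  simp only [pvGroup, pvValue]
  rw [pvOrder_eq]

-- the labelled filter of an appended element splits off at most one new pair
theorem pvValue_append (c : String) (xs : List (List (String × String))) (e : List (String × String)) :
    pvValue c (xs ++ [e]) = pvValue c xs ++ (if pvClassify e = c then [e] else []) := by
  simp only [pvValue, List.map_append, List.filter_append, List.map_cons, List.map_nil,
    List.filter_cons, List.filter_nil]
  split_ifs with h h2 h2 <;> simp_all

theorem pvFold_items (errors : List (List (String × String))) :
    (errors.foldl pvAStep PySem.Dict.empty).items = pvGroup errors := by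
  induction errors using List.reverseRecOn with
  | nil => rfl
  | append_singleton xs e ih =>
    rw [List.foldl_append, List.foldl_cons, List.foldl_nil, pvAStep_eq]
    have hkeys : (xs.foldl pvAStep PySem.Dict.empty).keys = PySem.Set.ofList (xs.map pvClassify) := by
      show (xs.foldl pvAStep PySem.Dict.empty).items.map Prod.fst = _
      rw [ih, pvGroup_eq, List.map_map]
      rw [show (Prod.fst ∘ fun c => (c, pvValue c xs)) = id from rfl, List.map_id]
    have hnd : (xs.foldl pvAStep PySem.Dict.empty).keys.Nodup := by
      rw [hkeys]; exact PySem.Set.nodup_ofList _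
    have hmapeq : PySem.Set.ofList ((xs ++ [e]).map pvClassify) =
        PySem.Set.add (PySem.Set.ofList (xs.map pvClassify)) (pvClassify e) := by
      simp [PySem.Set.ofList_eq_foldl, List.map_append, List.foldl_append]
    by_cases hc : pvClassify e ∈ PySem.Set.ofList (xs.map pvClassify)
    · have hcon : (xs.foldl pvAStep PySem.Dict.empty).contains (pvClassify e) = true := by
        rw [PySem.Dict.contains_eq_decide_mem_keys, hkeys]; exact decide_eq_true hc
      have hmem : (pvClassify e, pvValue (pvClassify e) xs) ∈ (xs.foldl pvAStep PySem.Dict.empty).items := by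
        rw [ih, pvGroup_eq]; exact List.mem_map.mpr ⟨pvClassify e, hc, rfl⟩
      have hget : (xs.foldl pvAStep PySem.Dict.empty).get? (pvClassify e) = some (pvValue (pvClassify e) xs) :=
        PySem.Dict.get?_of_mem_items _ hmem hnd
      have hgetD : (xs.foldl pvAStep PySem.Dict.empty).getD (pvClassify e) [] = pvValue (pvClassify e) xs := by
        rw [PySem.Dict.getD_eq_get?_getD, hget]; rfl
      rw [PySem.Dict.items_insert_of_contains _ _ hcon, hgetD, ih, pvGroup_eq, pvGroup_eq, hmapeq]
      have haddeq : PySem.Set.add (PySem.Set.ofList (xs.map pvClassify)) (pvClassify e) =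
          PySem.Set.ofList (xs.map pvClassify) := by
        unfold PySem.Set.add
        rw [if_pos ((PySem.Set.contains_iff _ _).mpr hc)]
      rw [haddeq, List.map_map]
      apply List.map_congr_left
      intro c _
      simp only [Function.comp_apply]
      rw [pvValue_append]
      by_cases hce : c = pvClassify e
      · subst hce; simp
      · have h1 : (c == pvClassify e) = false := by simpa using hce
        have h2 : ¬ pvClassify e = c := fun h => hce h.symm
        simp [h1, h2]
    · have hcon : (xs.foldl pvAStep PySem.Dict.empty).contains (pvClassify e) = false := by
        rw [PySem.Dict.contains_eq_decide_mem_keys, hkeys]; exact decide_eq_false hc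
      have hgetD : (xs.foldl pvAStep PySem.Dict.empty).getD (pvClassify e) [] = [] :=
        PySem.Dict.getD_of_not_contains _ _ hcon
      rw [PySem.Dict.items_insert_of_not_contains _ _ hcon, hgetD, ih, pvGroup_eq, pvGroup_eq, hmapeq]
      have haddeq : PySem.Set.add (PySem.Set.ofList (xs.map pvClassify)) (pvClassify e) =
          PySem.Set.ofList (xs.map pvClassify) ++ [pvClassify e] := by
        unfold PySem.Set.add
        rw [if_neg]
        intro h; exact hc ((PySem.Set.contains_iff _ _).mp h)
      rw [haddeq, List.map_append]
      congr 1
      · apply List.map_congr_left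
        intro c hcm
        rw [pvValue_append]
        have : ¬ pvClassify e = c := fun h => hc (h ▸ hcm)
        simp [this]
      · have hnone : pvValue (pvClassify e) xs = [] := by
          simp only [pvValue, List.map_eq_nil_iff, List.filter_eq_nil_iff]
          intro p hp
          have : p.1 ∈ xs.map pvClassify := by
            rcases List.mem_map.mp hp with ⟨a, ha, rfl⟩
            exact List.mem_map.mpr ⟨a, ha, rfl⟩
          intro hb
          exact hc ((PySem.Set.mem_ofList _ _).mpr (by rwa [eq_of_beq hb] at this))
        simp [pvValue_append, hnone]

-- ===== VERDICT (by name: the statement is the Claim_ definition above) =====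
theorem categorize_errors_py_spec : Claim_equal_categorize_errors_py := by
  intro errors _ _
  unfold Spec_categorize_errors_py categorize_errors_py categorize_errors_py_alt
  exact pvFold_items errors
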